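-- pv_equiv track=rewrite | github.com/arthur0824hao/ExperimentPipeline | pipeline/preprocess_lib/memory_estimator.py | _sampled_frontier
-- ===== SOURCE A (Python) =====
-- from typing import Any, Dict, List, Optional
--
-- def _sampled_frontier(batch_size: int, neighbors: List[int]) -> Dict[str, int]:
--     frontier = 1
--     sampled_nodes = 1
--     sampled_edges = 0
--     for k in neighbors:
--         frontier *= max(int(k), 1)
--         sampled_nodes += frontier
--         sampled_edges += frontier
--     return {
--         "sampled_nodes": int(batch_size * sampled_nodes),
--         "sampled_edges": int(batch_size * sampled_edges),
--     }
-- ===== SOURCE B (Python) =====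
-- def _sampled_frontier(batch_size, neighbors):
--     # Horner's rule, backward: total = m1*(1 + m2*(1 + ... mn*(1+0)))
--     # where mi = max(int(neighbors[i]), 1); no prefix products are ever materialized.
--     total = 0
--     for k in reversed(neighbors):
--         total = max(int(k), 1) * (1 + total)
--     return {
--         "sampled_nodes": int(batch_size * (1 + total)),
--         "sampled_edges": int(batch_size * total),
--     }
-- ===== Notes on version B (the rewrite author's own statement) =====
-- stated objective: alternative
-- what changed: Replaces A's forward loop maintaining three accumulators (running prefix product plus two sums) by a single backward Horner-rule pass total = m1*(1+m2*(1+...)), which never forms any prefix product and derives both outputs from one total.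
import Mathlib
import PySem

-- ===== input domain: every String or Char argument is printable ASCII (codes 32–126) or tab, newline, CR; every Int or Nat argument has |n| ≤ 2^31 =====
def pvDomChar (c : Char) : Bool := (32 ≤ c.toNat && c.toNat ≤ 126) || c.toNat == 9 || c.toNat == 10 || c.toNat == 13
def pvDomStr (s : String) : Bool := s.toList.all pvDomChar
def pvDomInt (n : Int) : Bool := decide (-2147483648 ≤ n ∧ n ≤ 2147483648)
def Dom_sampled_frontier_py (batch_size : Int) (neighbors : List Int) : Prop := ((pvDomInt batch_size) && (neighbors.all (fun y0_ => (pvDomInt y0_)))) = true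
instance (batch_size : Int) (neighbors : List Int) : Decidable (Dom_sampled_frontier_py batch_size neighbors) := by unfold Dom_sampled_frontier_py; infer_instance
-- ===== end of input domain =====

-- B replaces A's forward three-accumulator loop by one backward Horner-rule pass; alternative decomposition, same exact values.

-- ===== PORT A =====
-- fused forward loop over (frontier, sampled_nodes, sampled_edges)
def sampled_frontier_py (batch_size : Int) (neighbors : List Int) : List (String × Int) :=
  let s := neighbors.foldl
    (fun (st : Int × Int × Int) k =>
      let frontier := st.1 * max k 1
      (frontier, st.2.1 + frontier, st.2.2 + frontier))
    (1, 1, 0)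
  [("sampled_nodes", batch_size * s.2.1), ("sampled_edges", batch_size * s.2.2)]

-- ===== PORT B =====
-- Source B's 'for k in reversed(neighbors): total = max(k,1)*(1+total)' is the right fold below
def pvHorner : List Int → Int
  | [] => 0
  | k :: rest => max k 1 * (1 + pvHorner rest)

def sampled_frontier_py_alt (batch_size : Int) (neighbors : List Int) : List (String × Int) :=
  let total := pvHorner neighbors
  [("sampled_nodes", batch_size * (1 + total)), ("sampled_edges", batch_size * total)]

-- ===== PRECONDITION & SPEC =====
def Spec_sampled_frontier_py (batch_size : Int) (neighbors : List Int) (out : List (String × Int)) : Prop := out = sampled_frontier_py_alt batch_size neighbors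
instance (batch_size : Int) (neighbors : List Int) (out : List (String × Int)) : Decidable (Spec_sampled_frontier_py batch_size neighbors out) := by unfold Spec_sampled_frontier_py; infer_instance

-- ===== CLAIM (what is proved, stated in full; the proofs are below) =====
def Claim_equal_sampled_frontier_py : Prop := ∀ (batch_size : Int) (neighbors : List Int), Dom_sampled_frontier_py batch_size neighbors → Spec_sampled_frontier_py batch_size neighbors (sampled_frontier_py batch_size neighbors)

-- ===== LEMMAS AND PROOFS =====
theorem pv_loop_eq (xs : List Int) : ∀ (f n e : Int),
    xs.foldl
      (fun (st : Int × Int × Int) k =>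
        let frontier := st.1 * max k 1
        (frontier, st.2.1 + frontier, st.2.2 + frontier))
      (f, n, e)
    = (f * (xs.map (fun k => max k 1)).prod, n + f * pvHorner xs, e + f * pvHorner xs) := by
  induction xs with
  | nil => intro f n e; simp [pvHorner]
  | cons k rest ih =>
      intro f n e
      simp only [List.foldl, List.map, List.prod_cons, pvHorner]
      rw [ih]
      refine Prod.ext ?_ (Prod.ext ?_ ?_) <;> simp <;> ring

-- ===== VERDICT (by name: the statement is the Claim_ definition above) =====
theorem sampled_frontier_py_spec : Claim_equal_sampled_frontier_py := by
  intro batch_size neighbors _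
  unfold Spec_sampled_frontier_py sampled_frontier_py sampled_frontier_py_alt
  simp only [pv_loop_eq]
  norm_num
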